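-- pv_equiv track=rewrite | github.com/amyyuanmin/amy_test | inbox_test/multiple_pf/base_func.py | compare_ptn
-- ===== SOURCE A (Python) =====
-- def compare_ptn(lba_idx, src_ptn, dst_ptn):
--     BYTE_LEN = 8
--     BYTE_mask = [0x1, 0x2, 0x4, 0x8, 0x10, 0x20, 0x40, 0x80]
--     result_str = ""
--     for ptn_idx in range(len(src_ptn)):
--         result_byte = src_ptn[ptn_idx]^dst_ptn[ptn_idx]
--         for byte_idx in range(BYTE_LEN):
--             if BYTE_mask[byte_idx] & result_byte:
--                 result_str+=("LBA idx:%d Byte idx:%d bit idx:%d 0x%x <-> 0x%x\n" % (lba_idx, ptn_idx, byte_idx, src_ptn[ptn_idx],dst_ptn[ptn_idx]))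
--     return result_str
-- ===== SOURCE B (Python) =====
-- # 256-entry table: _BITS[v] = ascending bit positions set in v, built once by
-- # dynamic programming on v >> 1 (no per-byte bit scanning at query time).
-- _BITS = [[]]
-- for _v in range(1, 256):
--     _BITS.append(([0] if _v & 1 else []) + [b + 1 for b in _BITS[_v >> 1]])
--
--
-- def compare_ptn(lba_idx, src_ptn, dst_ptn):
--     parts = []
--     for ptn_idx, (s, d) in enumerate(zip(src_ptn, dst_ptn)):
--         for bit_idx in _BITS[(s ^ d) & 0xFF]:
--             parts.append("LBA idx:%d Byte idx:%d bit idx:%d 0x%x <-> 0x%x\n"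
--                          % (lba_idx, ptn_idx, bit_idx, s, d))
--     return "".join(parts)
-- ===== Notes on version B (the rewrite author's own statement) =====
-- stated objective: alternative
-- what changed: Per-byte bit testing is removed entirely: a 256-entry table mapping each byte value to its ascending set-bit positions is built once by dynamic programming on v>>1, and the function iterates over enumerate(zip(src,dst)), looks the masked XOR up in the table, and joins collected lines once.
import Mathlib
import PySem

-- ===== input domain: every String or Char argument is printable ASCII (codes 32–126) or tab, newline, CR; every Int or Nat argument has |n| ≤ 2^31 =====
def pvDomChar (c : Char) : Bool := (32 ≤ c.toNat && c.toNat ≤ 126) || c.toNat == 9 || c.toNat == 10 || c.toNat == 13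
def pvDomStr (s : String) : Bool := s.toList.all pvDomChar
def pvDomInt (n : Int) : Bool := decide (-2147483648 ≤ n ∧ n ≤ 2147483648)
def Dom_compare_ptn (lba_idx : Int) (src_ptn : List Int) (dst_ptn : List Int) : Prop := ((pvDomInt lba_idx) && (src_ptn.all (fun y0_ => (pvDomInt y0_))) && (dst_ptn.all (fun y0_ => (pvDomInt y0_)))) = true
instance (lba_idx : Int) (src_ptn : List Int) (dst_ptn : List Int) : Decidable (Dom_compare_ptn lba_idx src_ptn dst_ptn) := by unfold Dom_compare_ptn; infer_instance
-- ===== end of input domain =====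

-- B drops A's per-byte 8-mask bit scan for a 256-entry set-bit-position table built once by
-- dynamic programming, iterates enumerate(zip(src,dst)) and joins the collected lines once.

-- Python's '%x' formatting of an int: hex digits of |n|, '-' prefix for negative n (exact).
def pvHex (n : Int) : String :=
  if n < 0 then "-" ++ String.ofList (Nat.toDigits 16 n.natAbs)
  else String.ofList (Nat.toDigits 16 n.toNat)

-- the format string "LBA idx:%d Byte idx:%d bit idx:%d 0x%x <-> 0x%x\n" (exact on ints)
def pvLine (lba i b s d : Int) : String :=
  "LBA idx:" ++ PySem.Int.toStr lba ++ " Byte idx:" ++ PySem.Int.toStr i ++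
  " bit idx:" ++ PySem.Int.toStr b ++ " 0x" ++ pvHex s ++ " <-> 0x" ++ pvHex d ++ "\n"

-- ===== PORT A =====
def pvByteMask : List Int := [0x1, 0x2, 0x4, 0x8, 0x10, 0x20, 0x40, 0x80]

def compare_ptn (lba_idx : Int) (src_ptn : List Int) (dst_ptn : List Int) : String :=
  (PySem.List.pyRange 0 (src_ptn.length : Int) 1).foldl (fun result_str ptn_idx =>
    let result_byte := PySem.Int.bxor (PySem.List.pyGetD src_ptn ptn_idx 0) (PySem.List.pyGetD dst_ptn ptn_idx 0)
    (PySem.List.pyRange 0 8 1).foldl (fun result_str byte_idx =>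
      if PySem.Int.band (PySem.List.pyGetD pvByteMask byte_idx 0) result_byte ≠ 0 then
        result_str ++ pvLine lba_idx ptn_idx byte_idx (PySem.List.pyGetD src_ptn ptn_idx 0) (PySem.List.pyGetD dst_ptn ptn_idx 0)
      else result_str) result_str) ""

-- ===== PORT B =====
-- Source B's module-level table: _BITS[v] = ascending set-bit positions of v, _BITS[v] built
-- from _BITS[v >> 1] (dynamic programming), for v in range(1, 256) starting from [[]].
def pvBitTable : List (List Int) :=
  (PySem.List.pyRange 1 256 1).foldl
    (fun t v => t ++ [(if PySem.Int.band v 1 ≠ 0 then ([0] : List Int) else [])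
                       ++ (PySem.List.pyGetD t (v >>> 1) []).map (· + 1)]) [[]]

-- the 'for ptn_idx, (s, d) in enumerate(zip(src_ptn, dst_ptn))' loop collecting parts
def pvPartsLoop (lba : Int) : Int → List (Int × Int) → List String
  | _, [] => []
  | i, (s, d) :: rest =>
      (PySem.List.pyGetD pvBitTable (PySem.Int.band (PySem.Int.bxor s d) 255) []).map
        (fun b => pvLine lba i b s d) ++ pvPartsLoop lba (i + 1) rest

def compare_ptn_alt (lba_idx : Int) (src_ptn : List Int) (dst_ptn : List Int) : String :=
  String.join (pvPartsLoop lba_idx 0 (src_ptn.zip dst_ptn))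

-- ===== PRECONDITION & SPEC =====
-- Pre_ excludes exactly the inputs where Python A raises IndexError: dst_ptn shorter than src_ptn.
def Pre_compare_ptn (lba_idx : Int) (src_ptn : List Int) (dst_ptn : List Int) : Prop :=
  src_ptn.length ≤ dst_ptn.length
instance (lba_idx : Int) (src_ptn : List Int) (dst_ptn : List Int) : Decidable (Pre_compare_ptn lba_idx src_ptn dst_ptn) := by unfold Pre_compare_ptn; infer_instance

def pvWitness_compare_ptn : Int × List Int × List Int := (5, [3, -7], [250, 9])

def Spec_compare_ptn (lba_idx : Int) (src_ptn : List Int) (dst_ptn : List Int) (out : String) : Prop := out = compare_ptn_alt lba_idx src_ptn dst_ptn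
instance (lba_idx : Int) (src_ptn : List Int) (dst_ptn : List Int) (out : String) : Decidable (Spec_compare_ptn lba_idx src_ptn dst_ptn out) := by unfold Spec_compare_ptn; infer_instance

-- ===== CLAIM (what is proved, stated in full; the proofs are below) =====
def Claim_equal_compare_ptn : Prop := ∀ (lba_idx : Int) (src_ptn : List Int) (dst_ptn : List Int), Dom_compare_ptn lba_idx src_ptn dst_ptn → Pre_compare_ptn lba_idx src_ptn dst_ptn → Spec_compare_ptn lba_idx src_ptn dst_ptn (compare_ptn lba_idx src_ptn dst_ptn)

-- ===== LEMMAS AND PROOFS =====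

-- proof-side reference: the ascending set-bit positions of x among bits 0..7
def pvBits (x : Nat) : List Nat := (List.range 8).filter (fun b => x.testBit b)

lemma pv_join_nil : String.join [] = "" := rfl

lemma pv_join_append (a b : List String) : String.join (a ++ b) = String.join a ++ String.join b := by
  induction a with
  | nil => simp [pv_join_nil]
  | cons x xs ih => simp_all [String.join_eq, String.append_assoc]

-- B's table agrees with the reference set-bit positions on every byte value
set_option maxRecDepth 200000 in
lemma pv_table : ∀ (x : Nat), x < 256 →
    PySem.List.pyGetD pvBitTable (x : Int) [] = (pvBits x).map (fun j => Int.ofNat j) := by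
  decide

lemma pv_table_int (r : Int) (h0 : 0 ≤ r) (h1 : r < 256) :
    PySem.List.pyGetD pvBitTable r [] = (pvBits r.toNat).map (fun j => Int.ofNat j) := by
  have h := pv_table r.toNat (by omega)
  rwa [Int.toNat_of_nonneg h0] at h

lemma pv_chain (k : Nat) (L : Nat → String) (m : Nat) : ∀ (acc : String),
    (List.range k).foldl (fun s b => if m.testBit b then s ++ L b else s) acc
      = acc ++ String.join (((List.range k).filter (fun b => m.testBit b)).map L) := by
  induction k with
  | zero => intro acc; simp [pv_join_nil]
  | succ k ih =>
    intro acc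
    rw [List.range_succ, List.foldl_append, List.filter_append, List.map_append, pv_join_append, ih]
    by_cases h : m.testBit k
    · simp [h, String.join, String.append_assoc]
    · simp [h, pv_join_nil]

lemma pv_band_bounds (r : Int) : 0 ≤ PySem.Int.band r 255 ∧ PySem.Int.band r 255 ≤ 255 := by
  unfold PySem.Int.band
  have h255 : ((255 : Int)).toNat = 255 := rfl
  split_ifs with h1 h2 h2
  · refine ⟨Int.natCast_nonneg _, ?_⟩
    have h := @Nat.and_le_right r.toNat ((255 : Int)).toNat
    rw [h255] at h
    rw [h255]
    exact_mod_cast h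
  · exact absurd (by norm_num) h2
  · rw [h255]
    exact ⟨Int.natCast_nonneg _, by exact_mod_cast Nat.sub_le 255 _⟩
  · exact absurd (by norm_num) h2

set_option maxRecDepth 8192 in
lemma pv_compl : ∀ j < 256, ∀ b < 8, (255 - j).testBit b = !(j.testBit b) := by decide

set_option maxHeartbeats 1000000 in
lemma pv_key (b : Nat) (hb : b < 8) (r : Int) :
    (PySem.Int.band ((2 : Int) ^ b) r ≠ 0) ↔ ((PySem.Int.band r 255).toNat).testBit b := by
  have h2b : ((2 : Int) ^ b).toNat = 2 ^ b := by
    have h : ((2 : Int) ^ b) = ((2 ^ b : Nat) : Int) := by push_cast; ring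
    rw [h, Int.toNat_natCast]
  by_cases hr : 0 ≤ r
  · have e1 : PySem.Int.band ((2 : Int) ^ b) r = ((2 ^ b &&& r.toNat : Nat) : Int) := by
      rw [PySem.Int.band_of_nonneg (by positivity) hr, h2b]
    have e2 : PySem.Int.band r 255 = ((r.toNat &&& 255 : Nat) : Int) := by
      rw [PySem.Int.band_of_nonneg hr (by norm_num)]
      rw [show ((255 : Int)).toNat = 255 from rfl]
    have hrt : (r.toNat &&& 255).testBit b = r.toNat.testBit b := by
      rw [Nat.testBit_and, show (255 : Nat) = 2 ^ 8 - 1 from rfl, Nat.testBit_two_pow_sub_one]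
      simp [hb]
    have hand : 2 ^ b &&& r.toNat = (r.toNat.testBit b).toNat * 2 ^ b := by
      rw [Nat.and_comm, Nat.and_two_pow]
    rw [e1, e2, Int.toNat_natCast, hrt, hand]
    cases hbt : r.toNat.testBit b <;> simp
  · have e1 : PySem.Int.band ((2 : Int) ^ b) r
        = ((((2 : Int) ^ b).toNat - (((2 : Int) ^ b).toNat &&& (-r - 1).toNat) : Nat) : Int) := by
      unfold PySem.Int.band
      rw [if_pos (by positivity), if_neg hr]
    have e2 : PySem.Int.band r 255
        = ((((255 : Int)).toNat - (((255 : Int)).toNat &&& (-r - 1).toNat) : Nat) : Int) := by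
      unfold PySem.Int.band
      rw [if_neg hr, if_pos (by norm_num)]
    set k := (-r - 1).toNat with hk
    have hand : 2 ^ b &&& k = (k.testBit b).toNat * 2 ^ b := by
      rw [Nat.and_comm, Nat.and_two_pow]
    have hkmod : (255 : Nat) &&& k = k % 256 := by
      rw [Nat.and_comm]
      have h := Nat.and_two_pow_sub_one_eq_mod k 8
      norm_num at h
      exact h
    have h255 : ((255 : Int)).toNat = 255 := rfl
    rw [e1, e2, h2b, h255, Int.toNat_natCast, hkmod, hand]
    have hcmp := pv_compl (k % 256) (Nat.mod_lt _ (by norm_num)) b hb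
    have hkb : (k % 256).testBit b = k.testBit b := by
      rw [show (256 : Nat) = 2 ^ 8 from rfl, Nat.testBit_mod_two_pow]
      simp [hb]
    rw [hcmp, hkb]
    cases hbt : k.testBit b <;> simp

-- A's inner 8-mask scan, started from acc, equals acc ++ the joined lines of B's table lookup.
set_option maxHeartbeats 1000000 in
lemma pv_core (r : Int) (L : Int → String) (acc : String) :
    (PySem.List.pyRange 0 8 1).foldl
      (fun s b => if PySem.Int.band (PySem.List.pyGetD pvByteMask b 0) r ≠ 0 then s ++ L b else s) acc
      = acc ++ String.join ((PySem.List.pyGetD pvBitTable (PySem.Int.band r 255) []).map L) := by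
  have hb := pv_band_bounds r
  have h0 := pv_key 0 (by norm_num) r
  have h1 := pv_key 1 (by norm_num) r
  have h2 := pv_key 2 (by norm_num) r
  have h3 := pv_key 3 (by norm_num) r
  have h4 := pv_key 4 (by norm_num) r
  have h5 := pv_key 5 (by norm_num) r
  have h6 := pv_key 6 (by norm_num) r
  have h7 := pv_key 7 (by norm_num) r
  rw [show ((2 : Int) ^ (0 : Nat)) = 1 from by norm_num] at h0
  rw [show ((2 : Int) ^ (1 : Nat)) = 2 from by norm_num] at h1
  rw [show ((2 : Int) ^ (2 : Nat)) = 4 from by norm_num] at h2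
  rw [show ((2 : Int) ^ (3 : Nat)) = 8 from by norm_num] at h3
  rw [show ((2 : Int) ^ (4 : Nat)) = 16 from by norm_num] at h4
  rw [show ((2 : Int) ^ (5 : Nat)) = 32 from by norm_num] at h5
  rw [show ((2 : Int) ^ (6 : Nat)) = 64 from by norm_num] at h6
  rw [show ((2 : Int) ^ (7 : Nat)) = 128 from by norm_num] at h7
  have hrange : PySem.List.pyRange 0 8 1 = [0, 1, 2, 3, 4, 5, 6, 7] := by decide
  rw [hrange]
  simp only [List.foldl_cons, List.foldl_nil]
  have g0 : PySem.List.pyGetD pvByteMask 0 0 = 1 := by decide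
  have g1 : PySem.List.pyGetD pvByteMask 1 0 = 2 := by decide
  have g2 : PySem.List.pyGetD pvByteMask 2 0 = 4 := by decide
  have g3 : PySem.List.pyGetD pvByteMask 3 0 = 8 := by decide
  have g4 : PySem.List.pyGetD pvByteMask 4 0 = 16 := by decide
  have g5 : PySem.List.pyGetD pvByteMask 5 0 = 32 := by decide
  have g6 : PySem.List.pyGetD pvByteMask 6 0 = 64 := by decide
  have g7 : PySem.List.pyGetD pvByteMask 7 0 = 128 := by decide
  rw [g0, g1, g2, g3, g4, g5, g6, g7]
  simp only [h0, h1, h2, h3, h4, h5, h6, h7]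
  have hchain := pv_chain 8 (fun b => L (b : Int)) ((PySem.Int.band r 255).toNat) acc
  have hrange8 : List.range 8 = [0, 1, 2, 3, 4, 5, 6, 7] := by decide
  rw [hrange8] at hchain
  simp only [List.foldl_cons, List.foldl_nil] at hchain
  simp only [Nat.cast_ofNat, Nat.cast_zero, Nat.cast_one] at hchain
  rw [pv_table_int _ hb.1 (by omega)]
  have hfuse : ((pvBits (PySem.Int.band r 255).toNat).map (fun j => Int.ofNat j)).map L
      = ((List.range 8).filter (fun b => (PySem.Int.band r 255).toNat.testBit b)).map
          (fun (b : Nat) => L (b : Int)) := by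
    unfold pvBits
    rw [List.map_map]
    rfl
  rw [hfuse, hrange8]
  exact hchain

-- A's outer fold from index a onward equals acc ++ the joined tail of B's loop.
lemma pv_main (lba : Int) (src dst : List Int) (hl : src.length ≤ dst.length) :
    ∀ (k a : Nat), a + k = src.length → ∀ acc : String,
    (PySem.List.pyRange (a : Int) (src.length : Int) 1).foldl (fun result_str ptn_idx =>
      let result_byte := PySem.Int.bxor (PySem.List.pyGetD src ptn_idx 0) (PySem.List.pyGetD dst ptn_idx 0)
      (PySem.List.pyRange 0 8 1).foldl (fun result_str byte_idx =>
        if PySem.Int.band (PySem.List.pyGetD pvByteMask byte_idx 0) result_byte ≠ 0 then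
          result_str ++ pvLine lba ptn_idx byte_idx (PySem.List.pyGetD src ptn_idx 0) (PySem.List.pyGetD dst ptn_idx 0)
        else result_str) result_str) acc
      = acc ++ String.join (pvPartsLoop lba (a : Int) ((src.zip dst).drop a)) := by
  intro k
  induction k with
  | zero =>
    intro a ha acc
    have hz : (src.zip dst).length = src.length := by
      rw [List.length_zip]; omega
    have hdrop : (src.zip dst).drop a = [] := List.drop_eq_nil_of_le (by omega)
    have hr : PySem.List.pyRange (a : Int) (src.length : Int) 1 = [] := by
      simp [PySem.List.pyRange]; omega
    simp [hr, hdrop, pvPartsLoop, pv_join_nil]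
  | succ k ih =>
    intro a ha acc
    have halt : a < src.length := by omega
    have hzlen : a < (src.zip dst).length := by rw [List.length_zip]; omega
    have hcons : PySem.List.pyRange (a : Int) (src.length : Int) 1
        = (a : Int) :: PySem.List.pyRange ((a : Int) + 1) (src.length : Int) 1 :=
      PySem.List.pyRange_one_cons (by exact_mod_cast halt)
    rw [hcons, List.foldl_cons]
    have hdrop : (src.zip dst).drop a = (src.zip dst)[a] :: (src.zip dst).drop (a + 1) :=
      (List.drop_eq_getElem_cons hzlen)
    have hget : (src.zip dst)[a] = (src[a], dst[a]'(by omega)) := List.getElem_zip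
    have hs : PySem.List.pyGetD src (a : Int) 0 = src[a] := by
      rw [PySem.List.pyGetD_natCast, List.getD_eq_getElem?_getD, List.getElem?_eq_getElem halt]
      rfl
    have hd : PySem.List.pyGetD dst (a : Int) 0 = dst[a]'(by omega) := by
      rw [PySem.List.pyGetD_natCast, List.getD_eq_getElem?_getD,
        List.getElem?_eq_getElem (show a < dst.length by omega)]
      rfl
    simp only [hs, hd]
    rw [pv_core (PySem.Int.bxor src[a] (dst[a]'(by omega)))
      (fun b => pvLine lba (a : Int) b src[a] (dst[a]'(by omega))) acc]
    have hcast : ((a : Int) + 1) = (((a + 1 : Nat)) : Int) := by push_cast; ring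
    rw [hcast, ih (a + 1) (by omega)]
    rw [hdrop, hget]
    simp only [pvPartsLoop, ← hcast]
    rw [pv_join_append, String.append_assoc]

-- ===== VERDICT (by name: the statement is the Claim_ definition above) =====
theorem compare_ptn_spec : Claim_equal_compare_ptn := by
  unfold Claim_equal_compare_ptn
  intro lba src dst _ hpre
  unfold Spec_compare_ptn compare_ptn compare_ptn_alt
  have h := pv_main lba src dst hpre src.length 0 (by omega) ""
  simpa using h
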